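-- pv_equiv track=rewrite | github.com/poolbule0/jz8cubemax | ui.py | _is_in_string_or_comment
-- ===== SOURCE A (Python) =====
-- def _is_in_string_or_comment(line, pos):
--     """检查位置是否在字符串或注释中"""
--     # 检查是否在注释中
--     comment_pos = line.find('//')
--     if comment_pos != -1 and pos >= comment_pos:
--         return True
--
--     # 检查是否在字符串中（简化版）
--     in_string = False
--     quote_char = None
--     for i, char in enumerate(line):
--         if i >= pos:
--             break
--         if char in ['"', "'"] and (i == 0 or line[i-1] != '\\'):
--             if not in_string:
--                 in_string = True
--                 quote_char = char
--             elif char == quote_char: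
--                 in_string = False
--     return in_string
-- ===== SOURCE B (Python) =====
-- def _is_in_string_or_comment(line, pos):
--     # Region-based scan: segments the prefix before pos into string regions
--     # instead of maintaining an in_string toggle flag.
--     comment_pos = line.find('//')
--     if comment_pos != -1 and pos >= comment_pos:
--         return True
--     n = len(line)
--     i = 0
--     while i < n and i < pos:
--         ch = line[i]
--         if ch in ('"', "'") and (i == 0 or line[i - 1] != '\\'):
--             # string opens at i: scan for its unescaped closing quote before pos
--             j = i + 1
--             while j < n and j < pos:
--                 if line[j] == ch and line[j - 1] != '\\':
--                     break
--                 j += 1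
--             if j >= n or j >= pos:
--                 return True  # still open at the prefix end
--             i = j + 1
--         else:
--             i += 1
--     return False
-- ===== Notes on version B (the rewrite author's own statement) =====
-- stated objective: alternative
-- what changed: Replaces A's single pass with an in_string/quote_char toggle state machine by a stateless region scan: an outer while-loop finds each unescaped opening quote and an inner scan jumps directly to its unescaped matching closing quote, returning True as soon as a string region is still open at the prefix end.
import Mathlib
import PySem

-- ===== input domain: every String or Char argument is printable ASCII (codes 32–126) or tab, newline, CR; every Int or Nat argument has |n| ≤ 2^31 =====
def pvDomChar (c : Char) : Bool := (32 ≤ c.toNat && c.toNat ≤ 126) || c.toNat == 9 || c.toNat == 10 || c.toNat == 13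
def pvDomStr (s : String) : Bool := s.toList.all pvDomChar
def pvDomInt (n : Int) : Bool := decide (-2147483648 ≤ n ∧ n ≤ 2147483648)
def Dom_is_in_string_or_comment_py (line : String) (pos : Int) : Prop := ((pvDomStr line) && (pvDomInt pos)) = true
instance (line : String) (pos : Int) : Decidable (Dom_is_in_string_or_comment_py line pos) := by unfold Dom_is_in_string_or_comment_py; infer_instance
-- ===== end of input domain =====

-- B replaces A's in_string/quote_char toggle loop by a region scan (find each string's
-- opening quote, then jump to its closing quote); objective: alternative decomposition, same cost.

-- ===== PORT A =====
-- state: (i, prev char, in_string, quote_char); breaks when i >= pos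
def pvAGo (pos : Int) : List Char → Int → Char → Bool → Option Char → Bool
  | [], _, _, ins, _ => ins
  | c :: rest, i, prev, ins, qc =>
    if pos ≤ i then ins
    else if (c = '"' ∨ c = '\'') ∧ (i = 0 ∨ prev ≠ '\\') then
      if ins = false then pvAGo pos rest (i + 1) c true (some c)
      else if some c = qc then pvAGo pos rest (i + 1) c false qc
      else pvAGo pos rest (i + 1) c ins qc
    else pvAGo pos rest (i + 1) c ins qc

def is_in_string_or_comment_py (line : String) (pos : Int) : Bool :=
  let comment_pos := PySem.Str.find line "//"
  if comment_pos ≠ -1 ∧ comment_pos ≤ pos then true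
  else pvAGo pos line.toList 0 ' ' false none

-- ===== PORT B =====
-- inner while-loop of Source B: scan for the unescaped closing quote q before pos;
-- returns the remaining suffix, next index and new prev on success
def pvBFind (pos : Int) (q : Char) : List Char → Int → Char → Option (List Char × Int × Char)
  | [], _, _ => none
  | c :: rest, j, prev =>
    if pos ≤ j then none
    else if c = q ∧ prev ≠ '\\' then some (rest, j + 1, c)
    else pvBFind pos q rest (j + 1) c

theorem pvBFind_length (pos : Int) (q : Char) :
    ∀ (cs : List Char) (j : Int) (prev : Char) (r : List Char) (j' : Int) (p' : Char),
      pvBFind pos q cs j prev = some (r, j', p') → r.length < cs.length := by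
  intro cs
  induction cs with
  | nil => intro j prev r j' p' h; simp [pvBFind] at h
  | cons c rest ih =>
    intro j prev r j' p' h
    rw [pvBFind] at h
    split_ifs at h with h1 h2
    -- the pos ≤ j branch (h : none = some …) is closed by split_ifs itself
    · simp only [Option.some.injEq, Prod.mk.injEq] at h
      obtain ⟨h', -, -⟩ := h
      subst h'
      simp only [List.length_cons]
      omega
    · have := ih _ _ _ _ _ h
      simp only [List.length_cons]
      omega

-- outer while-loop of Source B
def pvBGo (pos : Int) : List Char → Int → Char → Bool
  | [], _, _ => false
  | c :: rest, i, prev =>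
    if pos ≤ i then false
    else if (c = '"' ∨ c = '\'') ∧ (i = 0 ∨ prev ≠ '\\') then
      match h : pvBFind pos c rest (i + 1) c with
      | none => true
      | some (rest', i', prev') => pvBGo pos rest' i' prev'
    else pvBGo pos rest (i + 1) c
termination_by cs => cs.length
decreasing_by
  · exact Nat.lt_trans (pvBFind_length _ _ _ _ _ _ _ _ h) (by simp)
  · simp

def is_in_string_or_comment_py_alt (line : String) (pos : Int) : Bool :=
  let comment_pos := PySem.Str.find line "//"
  if comment_pos ≠ -1 ∧ comment_pos ≤ pos then true
  else pvBGo pos line.toList 0 ' '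

-- ===== PRECONDITION & SPEC =====
def Spec_is_in_string_or_comment_py (line : String) (pos : Int) (out : Bool) : Prop := out = is_in_string_or_comment_py_alt line pos
instance (line : String) (pos : Int) (out : Bool) : Decidable (Spec_is_in_string_or_comment_py line pos out) := by unfold Spec_is_in_string_or_comment_py; infer_instance

-- ===== CLAIM (what is proved, stated in full; the proofs are below) =====
def Claim_equal_is_in_string_or_comment_py : Prop := ∀ (line : String) (pos : Int), Dom_is_in_string_or_comment_py line pos → Spec_is_in_string_or_comment_py line pos (is_in_string_or_comment_py line pos)

-- ===== LEMMAS AND PROOFS =====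
theorem pv_main (pos : Int) :
    ∀ (cs : List Char),
      (∀ (i : Int) (prev : Char) (qc : Option Char), 0 ≤ i →
          pvAGo pos cs i prev false qc = pvBGo pos cs i prev) ∧
      (∀ (j : Int) (prev q : Char), 1 ≤ j → (q = '"' ∨ q = '\'') →
          pvAGo pos cs j prev true (some q) =
            (match pvBFind pos q cs j prev with
             | none => true
             | some (r, j', p') => pvBGo pos r j' p')) := by
  intro cs
  induction cs with
  | nil => exact ⟨by intro i prev qc _; simp [pvAGo, pvBGo],
                 by intro j prev q _ _; simp [pvAGo, pvBFind]⟩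
  | cons c rest ih =>
    obtain ⟨P, Q⟩ := ih
    constructor
    · intro i prev qc hi
      by_cases hb : pos ≤ i
      · simp [pvAGo, pvBGo, hb]
      · by_cases hcond : (c = '"' ∨ c = '\'') ∧ (i = 0 ∨ prev ≠ '\\')
        · rw [pvAGo, pvBGo, if_neg hb, if_neg hb, if_pos hcond, if_pos hcond, if_pos rfl,
              Q (i + 1) c c (by omega) hcond.1]
          cases hf : pvBFind pos c rest (i + 1) c with
          | none => simp
          | some t => obtain ⟨r, j', p'⟩ := t; simp
        · have := P (i + 1) c qc (by omega)
          simp [pvAGo, pvBGo, hb, hcond, this]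
    · intro j prev q hj hq
      by_cases hb : pos ≤ j
      · simp [pvAGo, pvBFind, hb]
      · by_cases hcond : (c = '"' ∨ c = '\'') ∧ (j = 0 ∨ prev ≠ '\\')
        · have hprev : prev ≠ '\\' := by
            rcases hcond.2 with h0 | h; · omega
            · exact h
          by_cases hcq : c = q
          · subst hcq
            have hfind : pvBFind pos c (c :: rest) j prev = some (rest, j + 1, c) := by
              rw [pvBFind, if_neg hb, if_pos (show c = c ∧ prev ≠ '\\' from ⟨rfl, hprev⟩)]
            have hstep : pvAGo pos (c :: rest) j prev true (some c)
                = pvAGo pos rest (j + 1) c false (some c) := by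
              rw [pvAGo, if_neg hb, if_pos hcond]
              simp
            rw [hstep, hfind]
            exact P (j + 1) c (some c) (by omega)
          · have hfind : pvBFind pos q (c :: rest) j prev = pvBFind pos q rest (j + 1) c := by
              rw [pvBFind, if_neg hb,
                  if_neg (show ¬ (c = q ∧ prev ≠ '\\') from fun h' => hcq h'.1)]
            have hstep : pvAGo pos (c :: rest) j prev true (some q)
                = pvAGo pos rest (j + 1) c true (some q) := by
              rw [pvAGo, if_neg hb, if_pos hcond]
              simp [hcq]
            rw [hstep, hfind]
            exact Q (j + 1) c q (by omega) hq
        · have hnc : ¬ (c = q ∧ prev ≠ '\\') := by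
            intro ⟨h1, h2⟩
            apply hcond
            constructor
            · rcases hq with h | h <;> simp [h1, h]
            · right; exact h2
          rw [pvAGo, pvBFind, if_neg hb, if_neg hb, if_neg hcond, if_neg hnc]
          exact Q (j + 1) c q (by omega) hq

-- ===== VERDICT (by name: the statement is the Claim_ definition above) =====
theorem is_in_string_or_comment_py_spec : Claim_equal_is_in_string_or_comment_py := by
  intro line pos _
  unfold Spec_is_in_string_or_comment_py is_in_string_or_comment_py is_in_string_or_comment_py_alt
  rw [(pv_main pos line.toList).1 0 ' ' none (by omega)]
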